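-- pv_equiv track=rewrite | github.com/GeniusMachado/bootcamp | learning_scripts/tiktok_assessment/question2.py | solution
-- ===== SOURCE A (Python) =====
-- def solution(readings):
--     counts = {}
--
--     for n in readings:
--         # 1. Reduce number to a single digit
--         while n >= 10:
--             temp_sum = 0
--             # Convert to string to iterate digits easily
--             for digit in str(n):
--                 temp_sum += int(digit)
--             n = temp_sum
--
--         # 2. Count the frequency of this final single digit
--         if n in counts:
--             counts[n] += 1
--         else:
--             counts[n] = 1
--
--     # 3. Find the digit with the highest frequency
--     # If there is a tie, pick the higher digit
--     best_digit = -1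
--     max_freq = -1
--
--     for digit, freq in counts.items():
--         if freq > max_freq:
--             max_freq = freq
--             best_digit = digit
--         elif freq == max_freq:
--             # Tie-breaker: choose the larger digit
--             if digit > best_digit:
--                 best_digit = digit
--
--     return best_digit
-- ===== SOURCE B (Python) =====
-- def solution(readings):
--     # Closed-form digital root instead of iterative digit summing; tie broken by two max passes.
--     counts = {}
--     for n in readings:
--         r = n if n < 10 else 1 + (n - 1) % 9
--         counts[r] = counts.get(r, 0) + 1
--     if not counts:
--         return -1
--     mf = max(counts.values())
--     return max(d for d in counts if counts[d] == mf)
-- ===== Notes on version B (the rewrite author's own statement) =====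
-- stated objective: alternative
-- what changed: B computes each element's digital root with the closed form 1+(n-1)%9 instead of A's repeated string-conversion digit-sum while loop, and picks the winner with two max passes (max frequency, then max digit among keys at that frequency) instead of A's manual best/tie accumulator loop.
import Mathlib
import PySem

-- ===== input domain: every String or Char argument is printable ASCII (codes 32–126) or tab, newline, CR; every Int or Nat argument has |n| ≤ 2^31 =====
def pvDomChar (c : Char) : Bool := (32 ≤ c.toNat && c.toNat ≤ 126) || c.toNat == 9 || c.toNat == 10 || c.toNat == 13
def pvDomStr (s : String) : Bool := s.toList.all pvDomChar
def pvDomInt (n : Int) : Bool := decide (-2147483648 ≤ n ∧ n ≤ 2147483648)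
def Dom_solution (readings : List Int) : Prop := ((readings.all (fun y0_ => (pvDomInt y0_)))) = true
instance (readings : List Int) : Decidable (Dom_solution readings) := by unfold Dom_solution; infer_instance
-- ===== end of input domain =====

-- B replaces A's per-element iterated digit-sum while-loop by the closed-form digital root
-- 1 + (n-1) % 9 and A's single best/tie selection loop by two max passes; return values proved equal.

-- ===== PORT A =====
-- A-side helper lemmas and pvDigitStep: one pass of A's inner digit-sum loop,
-- `for digit in str(n): temp_sum += int(digit)`; `(PySem.Int.ofChars? [c]).getD 0` is int(digit)
-- (the default is never used: every c is a digit char). The lemmas between here and pvReduce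
-- exist only to justify termination of A's `while n >= 10` loop (decreasing_by cites pvStep_toNat_lt).
theorem pvToDigitsCore_eq (fuel : Nat) : ∀ (n : Nat) (l : List Char), 0 < n → n < fuel →
    Nat.toDigitsCore 10 fuel n l = ((Nat.digits 10 n).map Nat.digitChar).reverse ++ l := by
  induction fuel with
  | zero => intro n l h1 h2; omega
  | succ f ih =>
    intro n l h1 h2
    rw [Nat.digits_def' (by norm_num : 1 < 10) h1]
    simp only [Nat.toDigitsCore]
    by_cases hd : n / 10 = 0
    · have : Nat.digits 10 (n / 10) = [] := by rw [hd]; simp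
      simp [hd, this]
    · have hpos : 0 < n / 10 := Nat.pos_of_ne_zero hd
      have hlt : n / 10 < f := by
        have := Nat.div_lt_self h1 (by norm_num : 1 < 10)
        omega
      simp only [hd, if_false, ih (n / 10) _ hpos hlt]
      simp

theorem pvDigitVal {d : Nat} (h : d < 10) : PySem.Int.ofChars? [Nat.digitChar d] = some (d : Int) := by
  interval_cases d <;> rfl

theorem pvFoldSum : ∀ (ds : List Nat) (init : Int), (∀ d ∈ ds, d < 10) →
    (ds.map Nat.digitChar).foldl (fun s c => s + (PySem.Int.ofChars? [c]).getD 0) init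
      = init + (ds.sum : Int) := by
  intro ds
  induction ds with
  | nil => simp
  | cons d t ih =>
    intro init hlt
    simp only [List.map_cons, List.foldl_cons]
    rw [pvDigitVal (hlt d (by simp))]
    rw [ih _ (fun x hx => hlt x (by simp [hx]))]
    simp only [Option.getD_some, List.sum_cons]
    push_cast
    ring

theorem pvDigitStep_eq {n : Int} (h : 10 ≤ n) :
    (PySem.Int.toChars n).foldl (fun s c => s + (PySem.Int.ofChars? [c]).getD 0) 0
      = ((Nat.digits 10 n.toNat).sum : Int) := by
  have hn : ¬ n < 0 := by omega
  have hpos : 0 < n.toNat := by omega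
  rw [show PySem.Int.toChars n = Nat.toDigits 10 n.toNat by simp [PySem.Int.toChars, hn]]
  rw [Nat.toDigits, pvToDigitsCore_eq _ _ _ hpos (by omega)]
  rw [List.append_nil, ← List.map_reverse]
  rw [pvFoldSum _ _ (fun d hd => Nat.digits_lt_base (by norm_num) (List.mem_reverse.mp hd))]
  simp

theorem pvDsum_le (m : Nat) : (Nat.digits 10 m).sum ≤ m := by
  induction m using Nat.strong_induction_on with
  | _ m ih =>
    rcases Nat.eq_zero_or_pos m with h | h
    · simp [h]
    · rw [Nat.digits_def' (by norm_num : 1 < 10) h]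
      have h2 := ih (m / 10) (Nat.div_lt_self h (by norm_num))
      have := Nat.mod_lt m (show 0 < 10 by norm_num)
      simp only [List.sum_cons]
      omega

theorem pvDsum_lt {m : Nat} (h : 10 ≤ m) : (Nat.digits 10 m).sum < m := by
  rw [Nat.digits_def' (by norm_num : 1 < 10) (by omega)]
  have h2 := pvDsum_le (m / 10)
  have h3 : 0 < m / 10 := Nat.div_pos (by omega) (by norm_num)
  have h4 := Nat.mod_lt m (show 0 < 10 by norm_num)
  have h5 := Nat.div_add_mod m 10
  simp only [List.sum_cons]
  omega

theorem pvStep_toNat_lt' {n : Int} (h : 10 ≤ n) :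
    (((Nat.digits 10 n.toNat).sum : Int)).toNat < n.toNat := by
  have := pvDsum_lt (show 10 ≤ n.toNat by omega)
  omega

def pvDigitStep (n : Int) : Int :=
  (PySem.Int.toChars n).foldl (fun s c => s + (PySem.Int.ofChars? [c]).getD 0) 0

theorem pvStep_toNat_lt {n : Int} (h : 10 ≤ n) : (pvDigitStep n).toNat < n.toNat := by
  rw [pvDigitStep, pvDigitStep_eq h]
  exact pvStep_toNat_lt' h

def pvReduce (n : Int) : Int :=
  if h : 10 ≤ n then pvReduce (pvDigitStep n) else n
termination_by n.toNat
decreasing_by exact pvStep_toNat_lt h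

-- A-side helper: the body of A's best_digit/max_freq selection loop (state s = (best_digit, max_freq)).
def pvStepA (s : Int × Int) (p : Int × Int) : Int × Int :=
  if s.2 < p.2 then (p.1, p.2)
  else if p.2 == s.2 then (if s.1 < p.1 then (p.1, s.2) else s)
  else s

def solution (readings : List Int) : Int :=
  (((readings.foldl
      (fun counts n =>
        let n := pvReduce n
        if counts.contains n then counts.insert n (counts.getD n 0 + 1)
        else counts.insert n 1)
      (PySem.Dict.empty : PySem.Dict Int Int)).items.foldl
    pvStepA ((-1 : Int), (-1 : Int))).1)

-- ===== PORT B =====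
def solution_alt (readings : List Int) : Int :=
  let counts := readings.foldl
    (fun counts n =>
      let r := if n < 10 then n else 1 + PySem.Int.mod (n - 1) 9
      counts.insert r (counts.getD r 0 + 1))
    (PySem.Dict.empty : PySem.Dict Int Int)
  if counts.items.isEmpty then (-1 : Int)
  else
    let mf := (PySem.List.max? counts.values id).getD 0
    -- max(d for d in counts if counts[d] == mf); the list is nonempty, so the getD default is never used
    (PySem.List.max? (counts.keys.filter (fun d => counts.getD d 0 == mf)) id).getD 0

-- ===== PRECONDITION & SPEC =====
def Spec_solution (readings : List Int) (out : Int) : Prop := out = solution_alt readings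
instance (readings : List Int) (out : Int) : Decidable (Spec_solution readings out) := by unfold Spec_solution; infer_instance

-- ===== CLAIM (what is proved, stated in full; the proofs are below) =====
def Claim_equal_solution : Prop := ∀ (readings : List Int), Dom_solution readings → Spec_solution readings (solution readings)

-- ===== LEMMAS AND PROOFS =====
theorem pvDsum_pos (m : Nat) (h : 0 < m) : 0 < (Nat.digits 10 m).sum := by
  induction m using Nat.strong_induction_on with
  | _ m ih =>
    rw [Nat.digits_def' (by norm_num : 1 < 10) h]
    simp only [List.sum_cons]
    rcases Nat.eq_zero_or_pos (m % 10) with h1 | h1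
    · have h2 : 0 < m / 10 := by
        rcases Nat.eq_zero_or_pos (m / 10) with h3 | h3
        · have := Nat.div_add_mod m 10; omega
        · exact h3
      have := ih (m / 10) (Nat.div_lt_self h (by norm_num)) h2
      omega
    · omega

theorem pvReduceNat (m : Nat) (h1 : 1 ≤ m) :
    pvReduce (m : Int) = 1 + PySem.Int.mod ((m : Int) - 1) 9 := by
  induction m using Nat.strong_induction_on with
  | _ m ih =>
    rw [PySem.Int.mod_eq_emod_of_pos (by norm_num)]
    by_cases h : 10 ≤ m
    · rw [pvReduce]
      rw [dif_pos (by exact_mod_cast h)]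
      have hstep : pvDigitStep (m : Int) = ((Nat.digits 10 m).sum : Int) := by
        rw [pvDigitStep, pvDigitStep_eq (by exact_mod_cast h)]
        simp
      have hlt := pvDsum_lt h
      have hpos := pvDsum_pos m (by omega)
      rw [hstep, ih _ hlt hpos]
      rw [PySem.Int.mod_eq_emod_of_pos (by norm_num)]
      have hmod : m % 9 = (Nat.digits 10 m).sum % 9 := Nat.modEq_digits_sum 9 10 (by norm_num) m
      omega
    · rw [pvReduce, dif_neg (by exact_mod_cast h)]
      have : m < 10 := by omega
      interval_cases m <;> decide

theorem pvReduce_eq_root (n : Int) :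
    pvReduce n = if n < 10 then n else 1 + PySem.Int.mod (n - 1) 9 := by
  by_cases h : n < 10
  · rw [pvReduce, dif_neg (by omega), if_pos h]
  · rw [if_neg h]
    obtain ⟨m, rfl⟩ : ∃ m : Nat, n = (m : Int) := ⟨n.toNat, by omega⟩
    exact pvReduceNat m (by omega)

def pvOmax (o : Option Int) (x : Int) : Option Int :=
  match o with
  | none => some x
  | some m => if m < x then some x else some m

theorem pvMaxId (xs : List Int) : PySem.List.max? xs id = xs.foldl pvOmax none := by
  unfold PySem.List.max?
  congr 1
  funext acc x
  cases acc <;> rfl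

theorem pvStepA_snd (s p : Int × Int) : (pvStepA s p).2 = max s.2 p.2 := by
  simp only [pvStepA, beq_iff_eq]
  split_ifs <;> simp <;> omega

theorem pvFoldMaxSnd_le (l : List (Int × Int)) (a : Int) :
    a ≤ l.foldl (fun m p => max m p.2) a := by
  induction l generalizing a with
  | nil => simp
  | cons p t ih => exact le_trans (le_max_left a p.2) (ih _)

theorem pvHeadEq (s p : Int × Int) (M : Int) (hs : s.2 ≤ M) (hph : p.2 = M) :
    pvOmax (if s.2 = M then some s.1 else none) p.1
      = (if max s.2 p.2 = M then some (pvStepA s p).1 else none) := by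
  simp only [pvStepA, pvOmax, beq_iff_eq, max_def]
  by_cases h1 : s.2 = M
  · rw [if_pos h1]
    simp only []
    split_ifs <;> first | rfl | omega
  · rw [if_neg h1]
    simp only []
    split_ifs <;> first | rfl | omega

theorem pvHeadNe (s p : Int × Int) (M : Int) (hs : s.2 ≤ M) (hp : p.2 ≤ M) (hph : p.2 ≠ M) :
    (if s.2 = M then some s.1 else none)
      = (if max s.2 p.2 = M then some (pvStepA s p).1 else none) := by
  simp only [pvStepA, beq_iff_eq, max_def]
  split_ifs <;> first | rfl | omega

theorem pvL2 (l : List (Int × Int)) : ∀ (s : Int × Int),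
    ((l.filter (fun p => p.2 == l.foldl (fun m q => max m q.2) s.2)).map Prod.fst).foldl pvOmax
      (if s.2 = l.foldl (fun m q => max m q.2) s.2 then some s.1 else none)
    = some ((l.foldl pvStepA s).1) := by
  induction l with
  | nil => intro s; simp
  | cons p t ih =>
    intro s
    simp only [List.foldl_cons]
    have ih' := ih (pvStepA s p)
    simp only [pvStepA_snd] at ih'
    have hs : s.2 ≤ t.foldl (fun m q => max m q.2) (max s.2 p.2) :=
      le_trans (le_max_left _ _) (pvFoldMaxSnd_le _ _)
    have hp : p.2 ≤ t.foldl (fun m q => max m q.2) (max s.2 p.2) :=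
      le_trans (le_max_right _ _) (pvFoldMaxSnd_le _ _)
    rw [List.filter_cons]
    by_cases hph : p.2 = t.foldl (fun m q => max m q.2) (max s.2 p.2)
    · have hc : (p.2 == t.foldl (fun m q => max m q.2) (max s.2 p.2)) = true := by
        simpa using hph
      rw [if_pos hc]
      simp only [List.map_cons, List.foldl_cons]
      rw [← ih']
      congr 1
      exact pvHeadEq s p _ hs hph
    · have hc : ¬ ((p.2 == t.foldl (fun m q => max m q.2) (max s.2 p.2)) = true) := by
        simpa using hph
      rw [if_neg hc]
      rw [← ih']
      congr 1
      exact pvHeadNe s p _ hs hp hph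

theorem pvOmax_some (a x : Int) : pvOmax (some a) x = some (max a x) := by
  simp only [pvOmax, max_def]
  split_ifs <;> first | rfl | (exfalso; omega) | (simp only [Option.some.injEq]; omega)

theorem pvFoldOmax_some (xs : List Int) : ∀ a, xs.foldl pvOmax (some a) = some (xs.foldl max a) := by
  induction xs with
  | nil => intro a; rfl
  | cons x t ih => intro a; simp only [List.foldl_cons, pvOmax_some, ih]

theorem pvFoldMaxSnd_mem (l : List (Int × Int)) : ∀ (a : Int) (p : Int × Int), p ∈ l →
    p.2 ≤ l.foldl (fun m q => max m q.2) a := by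
  induction l with
  | nil => simp
  | cons q t ih =>
    intro a p hp
    simp only [List.foldl_cons]
    rcases List.mem_cons.mp hp with h | h
    · subst h; exact le_trans (le_max_right _ _) (pvFoldMaxSnd_le _ _)
    · exact ih _ p h

theorem pvGetD_zero (d : PySem.Dict Int Int) (k : Int) (h : d.contains k = false) :
    d.getD k 0 = 0 := by
  simp only [PySem.Dict.getD, PySem.Dict.get?]
  rw [List.find?_eq_none.mpr]
  · rfl
  · intro p hp hc
    simp only [PySem.Dict.contains, List.any_eq_false] at h
    exact absurd hc (h p hp)

theorem pvTop : ∀ (readings : List Int),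
    (((readings.foldl
        (fun counts n =>
          let n := pvReduce n
          if counts.contains n then counts.insert n (counts.getD n 0 + 1)
          else counts.insert n 1)
        (PySem.Dict.empty : PySem.Dict Int Int)).items.foldl
      pvStepA ((-1 : Int), (-1 : Int))).1)
    = (let counts := readings.foldl
        (fun counts n =>
          let r := if n < 10 then n else 1 + PySem.Int.mod (n - 1) 9
          counts.insert r (counts.getD r 0 + 1))
        (PySem.Dict.empty : PySem.Dict Int Int)
      if counts.items.isEmpty then (-1 : Int)
      else
        let mf := (PySem.List.max? counts.values id).getD 0
        (PySem.List.max? (counts.keys.filter (fun d => counts.getD d 0 == mf)) id).getD 0) := by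
  intro readings
  have hstep : ∀ (acc : PySem.Dict Int Int), ∀ n ∈ readings,
      (fun (counts : PySem.Dict Int Int) (n : Int) =>
        let n := pvReduce n
        if counts.contains n then counts.insert n (counts.getD n 0 + 1)
        else counts.insert n 1) acc n
      = (fun (counts : PySem.Dict Int Int) (n : Int) =>
        let r := if n < 10 then n else 1 + PySem.Int.mod (n - 1) 9
        counts.insert r (counts.getD r 0 + 1)) acc n := by
    intro d n _
    simp only [pvReduce_eq_root]
    by_cases hc : d.contains (if n < 10 then n else 1 + PySem.Int.mod (n - 1) 9)
    · simp only [hc, if_true]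
    · simp only [Bool.not_eq_true] at hc
      simp only [hc, Bool.false_eq_true, if_false, pvGetD_zero _ _ hc]
      norm_num
  rw [PySem.List.foldl_congr_mem readings _ _ _ hstep]
  have hdict : readings.foldl
      (fun (counts : PySem.Dict Int Int) (n : Int) =>
        let r := if n < 10 then n else 1 + PySem.Int.mod (n - 1) 9
        counts.insert r (counts.getD r 0 + 1))
      (PySem.Dict.empty : PySem.Dict Int Int)
      = PySem.Dict.counter (readings.map (fun n => if n < 10 then n else 1 + PySem.Int.mod (n - 1) 9)) := by
    rw [← PySem.Dict.foldl_insert_getD_add_one_eq_counter, List.foldl_map]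
  rw [hdict]
  dsimp only
  rcases hre : readings with _ | ⟨r, rs⟩
  · rfl
  · rw [← hre]
    set root : Int → Int := fun n => if n < 10 then n else 1 + PySem.Int.mod (n - 1) 9 with hroot
    set roots := readings.map root with hroots
    set cnts := PySem.Dict.counter roots with hcnts
    have hits : cnts.items = (PySem.Set.ofList roots).map (fun k => (k, (roots.count k : Int))) :=
      PySem.Dict.items_counter roots
    have hmem : root r ∈ PySem.Set.ofList roots := by
      rw [PySem.Set.mem_ofList]
      rw [hroots, hre]
      exact List.mem_map_of_mem (by simp)
    have hne : cnts.items ≠ [] := by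
      rw [hits]
      intro hnil
      rw [List.map_eq_nil_iff] at hnil
      rw [hnil] at hmem
      exact List.not_mem_nil hmem
    have hvpos : ∀ p ∈ cnts.items, 1 ≤ p.2 := by
      intro p hp
      rw [hits] at hp
      obtain ⟨k, hk, rfl⟩ := List.mem_map.mp hp
      have hkr : k ∈ roots := (PySem.Set.mem_ofList _ _).mp hk
      have := List.count_pos_iff.mpr hkr
      simp only []
      exact_mod_cast this
    set MF := cnts.items.foldl (fun m q => max m q.2) (-1 : Int) with hMF
    have hMF1 : 1 ≤ MF := by
      obtain ⟨p, hp⟩ := List.exists_mem_of_ne_nil _ hne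
      exact le_trans (hvpos p hp) (pvFoldMaxSnd_mem _ _ p hp)
    have hie : cnts.items.isEmpty = false := by
      rcases hcase : cnts.items with _ | ⟨q, qt⟩
      · exact absurd hcase hne
      · rfl
    simp only [hie, Bool.false_eq_true, if_false]
    -- values nonempty
    obtain ⟨v, vt, hv⟩ : ∃ v vt, cnts.values = v :: vt := by
      have : cnts.values = cnts.items.map (fun p => p.2) := rfl
      rcases hcase : cnts.items with _ | ⟨q, qt⟩
      · exact absurd hcase hne
      · exact ⟨q.2, qt.map (fun p => p.2), by rw [this, hcase]; rfl⟩
    have hv1 : 1 ≤ v := by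
      have hvm : v ∈ cnts.values := by rw [hv]; exact List.mem_cons_self
      have : cnts.values = cnts.items.map (fun p => p.2) := rfl
      rw [this] at hvm
      obtain ⟨p, hp, hpv⟩ := List.mem_map.mp hvm
      rw [← hpv]; exact hvpos p hp
    have hmfB : (PySem.List.max? cnts.values id).getD 0 = MF := by
      rw [pvMaxId, hv]
      simp only [List.foldl_cons]
      rw [show pvOmax none v = some v from rfl, pvFoldOmax_some, Option.getD_some]
      have h1 : MF = cnts.values.foldl max (-1) := by
        rw [hMF, show cnts.values = cnts.items.map (fun p => p.2) from rfl, List.foldl_map]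
      rw [h1, hv]
      simp only [List.foldl_cons]
      rw [show max (-1 : Int) v = v by omega]
    rw [hmfB]
    have hkeys : cnts.keys.filter (fun d => cnts.getD d 0 == MF)
        = (cnts.items.filter (fun p => p.2 == MF)).map Prod.fst := by
      rw [show cnts.keys = cnts.items.map Prod.fst from rfl, List.filter_map]
      congr 1
      apply List.filter_congr
      intro p hp
      simp only [Function.comp_apply]
      rw [hcnts, PySem.Dict.getD_counter]
      rw [hits] at hp
      obtain ⟨k, hk, rfl⟩ := List.mem_map.mp hp
      rfl
    rw [hkeys]
    have hA := pvL2 cnts.items ((-1 : Int), (-1 : Int))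
    rw [if_neg (show ¬((-1 : Int), (-1 : Int)).2 = cnts.items.foldl (fun m q => max m q.2) ((-1 : Int), (-1 : Int)).2 from by
      simp only []
      rw [← hMF]; omega)] at hA
    rw [pvMaxId]
    rw [show cnts.items.foldl (fun m q => max m q.2) ((-1 : Int), (-1 : Int)).2 = MF from by rw [hMF]] at hA
    rw [hA]
    rfl

-- ===== VERDICT (by name: the statement is the Claim_ definition above) =====
theorem solution_spec : Claim_equal_solution := by
  intro readings _
  unfold Spec_solution solution solution_alt
  exact pvTop readings
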